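-- pv_equiv track=rewrite | github.com/gutfeeling/univariate-linear-regression | src/data/preprocessing_helpers.py | convert_to_int
-- ===== SOURCE A (Python) =====
-- def convert_to_int(integer_string_with_commas):
--     comma_separated_parts = integer_string_with_commas.split(",")
--     for i in range(len(comma_separated_parts)):
--         if len(comma_separated_parts[i]) > 3:
--             return None
--         if i != 0 and len(comma_separated_parts[i]) != 3:
--             return None
--     integer_string_without_commas = "".join(comma_separated_parts)
--     try:
--         return int(integer_string_without_commas)
--     except ValueError:
--         return None
-- ===== SOURCE B (Python) =====
-- def convert_to_int(integer_string_with_commas):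
--     # one streaming pass: validate the comma grouping with a run-length counter,
--     # no intermediate list of parts
--     run = 0
--     seen_comma = False
--     for ch in integer_string_with_commas:
--         if ch == ',':
--             if seen_comma and run != 3:
--                 return None
--             seen_comma = True
--             run = 0
--         else:
--             run += 1
--             if run > 3:
--                 return None
--     if seen_comma and run != 3:
--         return None
--     try:
--         return int(''.join(ch for ch in integer_string_with_commas if ch != ','))
--     except ValueError:
--         return None
-- ===== Notes on version B (the rewrite author's own statement) =====
-- stated objective: alternative
-- what changed: Replaces split-into-parts plus an indexed length-checking loop by a single streaming pass over the characters with a run-length counter (no intermediate parts list), then int() on the comma-stripped string.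
import Mathlib
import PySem

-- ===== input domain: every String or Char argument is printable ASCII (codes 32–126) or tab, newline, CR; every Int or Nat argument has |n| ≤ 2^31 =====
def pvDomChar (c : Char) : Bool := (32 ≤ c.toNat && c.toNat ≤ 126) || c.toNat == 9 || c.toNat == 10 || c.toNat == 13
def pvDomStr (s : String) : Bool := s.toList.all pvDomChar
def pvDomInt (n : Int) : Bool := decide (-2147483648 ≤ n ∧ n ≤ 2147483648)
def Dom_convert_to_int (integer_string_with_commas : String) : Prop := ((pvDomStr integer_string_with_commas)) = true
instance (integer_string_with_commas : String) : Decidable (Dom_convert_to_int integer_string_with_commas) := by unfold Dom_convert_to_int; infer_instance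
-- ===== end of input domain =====

-- B replaces A's split-then-indexed-length-loop validation by one streaming pass with a
-- run-length counter (no parts list); return value only, neither program mutates anything.

-- ===== PORT A =====
-- the 'for i in range(len(parts))' loop with its two early 'return None' tests, as a
-- Bool-valued recursion over the parts carrying the index i
def convA_check : List (List Char) → Nat → Bool
  | [], _ => true
  | p :: rest, i =>
    if p.length > 3 then false
    else if i ≠ 0 ∧ p.length ≠ 3 then false
    else convA_check rest (i + 1)

def convert_to_int (integer_string_with_commas : String) : Option Int :=
  let comma_separated_parts := PySem.Chars.splitOn integer_string_with_commas.toList ",".toList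
  if convA_check comma_separated_parts 0 then
    PySem.Int.ofChars? (PySem.Chars.join [] comma_separated_parts)
  else none

-- ===== PORT B =====
-- the streaming 'for ch in s' loop of Source B: run = length of the current chunk,
-- seen = whether a comma has been passed
def convB_scan : List Char → Nat → Bool → Bool
  | [], run, seen => !(seen && decide (run ≠ 3))
  | c :: cs, run, seen =>
    if c = ',' then
      if seen && decide (run ≠ 3) then false else convB_scan cs 0 true
    else
      if run + 1 > 3 then false else convB_scan cs (run + 1) seen

def convert_to_int_alt (integer_string_with_commas : String) : Option Int :=
  let cs := integer_string_with_commas.toList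
  if convB_scan cs 0 false then
    PySem.Int.ofChars? (cs.filter (fun ch => ch ≠ ','))
  else none

-- ===== PRECONDITION & SPEC =====
def Spec_convert_to_int (integer_string_with_commas : String) (out : Option Int) : Prop := out = convert_to_int_alt integer_string_with_commas
instance (integer_string_with_commas : String) (out : Option Int) : Decidable (Spec_convert_to_int integer_string_with_commas out) := by unfold Spec_convert_to_int; infer_instance

-- ===== CLAIM (what is proved, stated in full; the proofs are below) =====
def Claim_equal_convert_to_int : Prop := ∀ (integer_string_with_commas : String), Dom_convert_to_int integer_string_with_commas → Spec_convert_to_int integer_string_with_commas (convert_to_int integer_string_with_commas)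

-- ===== LEMMAS AND PROOFS =====

-- a simple structural model of splitting on a single comma
def mapHeadApp (pre : List Char) : List (List Char) → List (List Char)
  | [] => []
  | h :: t => (pre ++ h) :: t

def mySplit : List Char → List (List Char)
  | [] => [[]]
  | c :: cs => if c = ',' then [] :: mySplit cs else mapHeadApp [c] (mySplit cs)

lemma mySplit_ne_nil (cs : List Char) : mySplit cs ≠ [] := by
  induction cs with
  | nil => simp [mySplit]
  | cons c cs ih =>
    simp only [mySplit]
    split
    · simp
    · cases hm : mySplit cs with
      | nil => exact absurd hm ih
      | cons p t => simp [mapHeadApp]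

lemma splitOn_go_comma (fuel : Nat) : ∀ (l cur : List Char) (acc : List (List Char)),
    l.length ≤ fuel →
    PySem.Chars.splitOn.go [','] fuel l cur acc
      = acc.reverse ++ mapHeadApp cur.reverse (mySplit l) := by
  induction fuel with
  | zero =>
    intro l cur acc h
    have : l = [] := by cases l <;> simp_all
    subst this
    simp [PySem.Chars.splitOn.go, mySplit, mapHeadApp]
  | succ fuel ih =>
    intro l cur acc h
    cases l with
    | nil => simp [PySem.Chars.splitOn.go, mySplit, mapHeadApp]
    | cons c rest =>
      by_cases hc : c = ','
      · subst hc
        have hpre : [','].isPrefixOf (',' :: rest) = true := by simp [List.isPrefixOf]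
        simp only [PySem.Chars.splitOn.go, hpre, if_pos]
        have := ih rest [] ([].reverse ++ cur.reverse :: []) (by simpa using Nat.le_of_succ_le_succ h)
        simp only [List.length_singleton, List.drop_one, List.tail_cons]
        rw [ih rest [] (cur.reverse :: acc) (by simpa using Nat.le_of_succ_le_succ h)]
        simp only [mySplit, if_pos rfl]
        cases hm : mySplit rest with
        | nil => exact absurd hm (mySplit_ne_nil rest)
        | cons p t => simp [mapHeadApp]
      · have hpre : [','].isPrefixOf (c :: rest) = false := by
          simp [List.isPrefixOf]; exact fun hh => hc hh.symm
        simp only [PySem.Chars.splitOn.go, hpre, Bool.false_eq_true, if_false]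
        rw [ih rest (c :: cur) acc (by simpa using Nat.le_of_succ_le_succ h)]
        simp only [mySplit, if_neg hc]
        cases hm : mySplit rest with
        | nil => exact absurd hm (mySplit_ne_nil rest)
        | cons p t => simp [mapHeadApp]

lemma splitOn_comma (cs : List Char) :
    PySem.Chars.splitOn cs [','] = mySplit cs := by
  unfold PySem.Chars.splitOn
  rw [splitOn_go_comma (cs.length + 1) cs [] [] (by omega)]
  cases hm : mySplit cs with
  | nil => exact absurd hm (mySplit_ne_nil cs)
  | cons p t => simp [mapHeadApp]

-- joining with the empty separator is flattening
lemma join_nil_flatten (l : List (List Char)) : PySem.Chars.join [] l = l.flatten := by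
  simp only [PySem.Chars.join, List.intercalate]
  induction l with
  | nil => rfl
  | cons p t ih =>
    cases t with
    | nil => simp
    | cons q t' => simp_all [List.intersperse]

-- joining the parts of mySplit is exactly deleting the commas
lemma join_mySplit (cs : List Char) :
    PySem.Chars.join [] (mySplit cs) = cs.filter (fun ch => ch ≠ ',') := by
  rw [join_nil_flatten]
  induction cs with
  | nil => simp [mySplit]
  | cons c cs ih =>
    simp only [mySplit]
    by_cases hc : c = ','
    · subst hc
      simpa using ih
    · cases hm : mySplit cs with
      | nil => exact absurd hm (mySplit_ne_nil cs)
      | cons p t =>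
        rw [hm] at ih
        simp only [mapHeadApp, List.singleton_append, List.flatten_cons, List.filter_cons]
        simp only [List.flatten_cons] at ih
        simp [hc, ih]

-- A's loop from index 1 on just demands length 3 of every remaining part
lemma convA_check_pos (qs : List (List Char)) (i : Nat) (hi : i ≠ 0) :
    convA_check qs i = qs.all (fun q => q.length = 3) := by
  induction qs generalizing i with
  | nil => simp [convA_check]
  | cons q qs ih =>
    simp only [convA_check, List.all_cons]
    by_cases h3 : q.length = 3
    · simp [h3, hi, ih (i + 1) (by omega)]
    · by_cases hgt : q.length > 3
      · simp [hgt, h3]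
      · simp [hgt, hi, h3]

-- the streaming scan computes A's condition on the parts of the remaining input:
-- first chunk bounded (or exactly 3 once a comma has been passed), later chunks exactly 3
lemma convB_scan_eq (cs : List Char) : ∀ (run : Nat) (seen : Bool), run ≤ 3 →
    ∀ (p : List Char) (t : List (List Char)), mySplit cs = p :: t →
    convB_scan cs run seen
      = ((if seen then decide (run + p.length = 3) else decide (run + p.length ≤ 3))
          && t.all (fun q => q.length = 3)) := by
  induction cs with
  | nil =>
    intro run seen hrun p t hm
    have hm' : ([[]] : List (List Char)) = p :: t := hm
    injection hm' with h1 h2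
    subst h1; subst h2
    cases seen with
    | false => simp [convB_scan]; omega
    | true => simp [convB_scan]; all_goals omega
  | cons c cs ih =>
    intro run seen hrun p t hm
    by_cases hc : c = ','
    · subst hc
      simp only [mySplit] at hm
      injection hm with h1 h2
      subst h1; subst h2
      cases hm2 : mySplit cs with
      | nil => exact absurd hm2 (mySplit_ne_nil cs)
      | cons q t' =>
        simp only [convB_scan, if_pos rfl]
        rw [ih 0 true (by omega) q t' hm2]
        cases seen with
        | false => simp [hm2]; intros; omega
        | true =>
          by_cases h3 : run = 3
          · simp [h3, hm2]
          · simp [h3]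
    · simp only [mySplit, if_neg hc] at hm
      cases hm2 : mySplit cs with
      | nil => exact absurd hm2 (mySplit_ne_nil cs)
      | cons q t' =>
        rw [hm2] at hm
        simp only [mapHeadApp, List.cons.injEq, List.singleton_append] at hm
        obtain ⟨hp, ht⟩ := hm
        subst hp; subst ht
        simp only [convB_scan, if_neg hc]
        by_cases hbig : run + 1 > 3
        · have : run = 3 := by omega
          subst this
          simp only [if_pos hbig]
          cases seen <;> simp <;> omega
        · simp only [if_neg hbig]
          rw [ih (run + 1) seen (by omega) q t' hm2]
          have harith : run + 1 + q.length = run + (q.length + 1) := by omega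
          cases seen <;> simp [harith] <;> rfl

-- ===== VERDICT (by name: the statement is the Claim_ definition above) =====
theorem convert_to_int_spec : Claim_equal_convert_to_int := by
  intro s _
  unfold Spec_convert_to_int convert_to_int convert_to_int_alt
  have hsep : (",".toList : List Char) = [','] := rfl
  rw [hsep, splitOn_comma]
  cases hm : mySplit s.toList with
  | nil => exact absurd hm (mySplit_ne_nil s.toList)
  | cons p t =>
    have hA : convA_check (p :: t) 0
        = (decide (p.length ≤ 3) && t.all (fun q => q.length = 3)) := by
      simp only [convA_check]
      by_cases hgt : p.length > 3
      · simp [hgt]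
      · simp only [if_neg hgt]
        rw [convA_check_pos t 1 (by omega)]
        simp
        all_goals omega
    have hB : convB_scan s.toList 0 false
        = (decide (p.length ≤ 3) && t.all (fun q => q.length = 3)) := by
      rw [convB_scan_eq s.toList 0 false (by omega) p t hm]
      simp
    have hJ : PySem.Chars.join [] (p :: t)
        = s.toList.filter (fun ch => ch ≠ ',') := by
      rw [← hm, join_mySplit]
    simp only [hA, hB, hJ]
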